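-- pv_equiv track=rewrite | github.com/illdynamics/visual-faqtory | vfaq/sliding_story_engine.py | _determine_windows
-- ===== SOURCE A (Python) =====
-- from typing import Any, Dict, List, Optional
--
-- def _determine_windows(num_paragraphs: int, max_paragraphs: int) -> List[List[int]]:
--     """Compute the sliding window schedule for the story.
--
--     Given P paragraphs and maximum window size M, produce a list of lists
--     where each inner list contains 1‑based indices of paragraphs to include
--     for the corresponding cycle. The schedule follows three phases:
--
--         1. Ramp‑up: For cycle 1..min(P, M), include paragraphs [1],
--            [1,2], … up to [1..M].
--         2. Sliding: For cycles M+1..P, include windows of size M that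
--            slide forward by one: [2..M+1], [3..M+2], … [P-M+1..P].
--         3. Ramp‑down: After the last full window, drop the earliest
--            paragraph each cycle until only one remains: [P-(M-2)..P], …,
--            [P]. The final cycle is the single paragraph window.
--
--     Args:
--         num_paragraphs: Total number of paragraphs in the story.
--         max_paragraphs: Maximum window size M.
--
--     Returns:
--         List of windows, each represented as a list of 1‑based indices.
--     """
--     windows: List[List[int]] = []
--     M = max(1, max_paragraphs)
--     P = num_paragraphs
--
--     # Phase 1: ramp‑up — grow window from [1] to [1..min(P, M)]
--     for k in range(1, min(P, M) + 1):
--         windows.append(list(range(1, k + 1)))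
--
--     # Phase 2: sliding — when P > M, slide a fixed window of size M
--     if P > M:
--         for start in range(2, P - M + 2):
--             windows.append(list(range(start, start + M)))
--
--     # Phase 3: ramp‑down — always ramp down to a single paragraph
--     # Start from the last generated window and drop the earliest paragraph
--     if windows:
--         last_window = windows[-1]
--         # Continue dropping first element until only one remains
--         while len(last_window) > 1:
--             last_window = last_window[1:]
--             windows.append(last_window.copy())
--
--     return windows
-- ===== SOURCE B (Python) =====
-- from typing import List
--
-- def _determine_windows(num_paragraphs: int, max_paragraphs: int) -> List[List[int]]:
--     """Emit each window as a contiguous range [lo..hi] from its endpoints."""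
--     M = max(1, max_paragraphs)
--     P = num_paragraphs
--     # Growing/sliding windows, one per right endpoint hi = 1..P.
--     forward = [list(range(max(1, hi - M + 1), hi + 1)) for hi in range(1, P + 1)]
--     # Ramp-down windows, one per left endpoint after the last forward window.
--     down = [list(range(lo, P + 1)) for lo in range(max(1, P - M + 1) + 1, P + 1)]
--     return forward + down
-- ===== Notes on version B (the rewrite author's own statement) =====
-- stated objective: simpler
-- what changed: Replaced the three stateful phases (ramp-up loop, conditional slide loop, while-loop that repeatedly slices the last window) by two comprehensions that emit every window directly from its endpoints: [max(1,hi-M+1)..hi] for each right endpoint hi, then [lo..P] for each ramp-down left endpoint.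
import Mathlib
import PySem

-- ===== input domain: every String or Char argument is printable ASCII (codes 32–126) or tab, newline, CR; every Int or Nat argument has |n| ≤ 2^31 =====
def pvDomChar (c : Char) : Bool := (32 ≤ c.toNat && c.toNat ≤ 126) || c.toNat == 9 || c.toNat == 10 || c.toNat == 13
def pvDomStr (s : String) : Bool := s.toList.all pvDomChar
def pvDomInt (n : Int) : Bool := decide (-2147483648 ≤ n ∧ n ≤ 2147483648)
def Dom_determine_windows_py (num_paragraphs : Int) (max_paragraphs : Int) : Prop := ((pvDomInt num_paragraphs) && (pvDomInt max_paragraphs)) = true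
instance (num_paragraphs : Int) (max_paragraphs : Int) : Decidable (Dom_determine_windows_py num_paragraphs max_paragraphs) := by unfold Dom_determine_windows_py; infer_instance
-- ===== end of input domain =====

-- B replaces A's three stateful phases (ramp-up loop, conditional slide loop, while-loop slicing
-- the last window) by two endpoint-driven comprehensions; objective: simpler, same cost.

-- ===== PORT A =====
-- the phase-3 while loop: while len(last_window) > 1: last_window = last_window[1:]; windows.append(...)
def rampDownA (w : List Int) : List (List Int) :=
  if w.length > 1 then
    let w' := PySem.List.slice w (some 1) none
    w' :: rampDownA w'
  else []
termination_by w.length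
decreasing_by simp [PySem.List.slice_from_one]; omega

def determine_windows_py (num_paragraphs : Int) (max_paragraphs : Int) : List (List Int) :=
  let M := max 1 max_paragraphs
  let P := num_paragraphs
  -- Phase 1: ramp-up
  let windows := (PySem.List.pyRange 1 (min P M + 1) 1).foldl
      (fun ws k => ws ++ [PySem.List.pyRange 1 (k + 1) 1]) ([] : List (List Int))
  -- Phase 2: sliding
  let windows := if P > M then
      (PySem.List.pyRange 2 (P - M + 2) 1).foldl
        (fun ws s => ws ++ [PySem.List.pyRange s (s + M) 1]) windows
    else windows
  -- Phase 3: ramp-down from the last generated window (windows[-1] on a nonempty list)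
  match windows.getLast? with
  | some last => windows ++ rampDownA last
  | none => windows

-- ===== PORT B =====
def determine_windows_py_alt (num_paragraphs : Int) (max_paragraphs : Int) : List (List Int) :=
  let M := max 1 max_paragraphs
  let P := num_paragraphs
  let forward := (PySem.List.pyRange 1 (P + 1) 1).map
      (fun hi => PySem.List.pyRange (max 1 (hi - M + 1)) (hi + 1) 1)
  let down := (PySem.List.pyRange (max 1 (P - M + 1) + 1) (P + 1) 1).map
      (fun lo => PySem.List.pyRange lo (P + 1) 1)
  forward ++ down

-- ===== PRECONDITION & SPEC =====
def Spec_determine_windows_py (num_paragraphs : Int) (max_paragraphs : Int) (out : List (List Int)) : Prop := out = determine_windows_py_alt num_paragraphs max_paragraphs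
instance (num_paragraphs : Int) (max_paragraphs : Int) (out : List (List Int)) : Decidable (Spec_determine_windows_py num_paragraphs max_paragraphs out) := by unfold Spec_determine_windows_py; infer_instance

-- ===== CLAIM (what is proved, stated in full; the proofs are below) =====
def Claim_equal_determine_windows_py : Prop := ∀ (num_paragraphs : Int) (max_paragraphs : Int), Dom_determine_windows_py num_paragraphs max_paragraphs → Spec_determine_windows_py num_paragraphs max_paragraphs (determine_windows_py num_paragraphs max_paragraphs)

-- ===== LEMMAS AND PROOFS =====

lemma pyRange_shift (a b c : Int) :
    PySem.List.pyRange (a + c) (b + c) 1 = (PySem.List.pyRange a b 1).map (fun x => x + c) := by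
  simp [PySem.List.pyRange_one, List.map_map]
  intro k _
  ring

-- the while loop on a contiguous window [L..Q] emits exactly the suffix windows [lo..Q], lo = L+1..Q
lemma rampDownA_pyRange (Q : Int) : ∀ (n : Nat) (L : Int), L + n = Q →
    rampDownA (PySem.List.pyRange L (Q + 1) 1) =
      (PySem.List.pyRange (L + 1) (Q + 1) 1).map (fun lo => PySem.List.pyRange lo (Q + 1) 1) := by
  intro n
  induction n with
  | zero =>
      intro L hL
      rw [rampDownA]
      rw [if_neg (by rw [PySem.List.length_pyRange_one]; omega)]
      rw [PySem.List.pyRange_one_eq_nil (by omega : Q + 1 ≤ L + 1)]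
      simp
  | succ m ih =>
      intro L hL
      have hlt : L < Q := by omega
      rw [rampDownA]
      have hlen : (PySem.List.pyRange L (Q + 1) 1).length > 1 := by
        rw [PySem.List.length_pyRange_one]; omega
      rw [if_pos hlen]
      have htail : PySem.List.slice (PySem.List.pyRange L (Q + 1) 1) (some 1) none
          = PySem.List.pyRange (L + 1) (Q + 1) 1 := by
        rw [PySem.List.slice_from_one, PySem.List.pyRange_one_cons (by omega : L < Q + 1)]
        rfl
      rw [htail]
      show PySem.List.pyRange (L + 1) (Q + 1) 1
            :: rampDownA (PySem.List.pyRange (L + 1) (Q + 1) 1) = _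
      rw [ih (L + 1) (by omega)]
      conv_rhs => rw [PySem.List.pyRange_one_cons (show L + 1 < Q + 1 by omega), List.map_cons]

lemma max_one_of_le {x : Int} (h : x ≤ 1) : max 1 x = 1 := by omega

theorem determine_windows_py_eq (P MP : Int) :
    determine_windows_py P MP = determine_windows_py_alt P MP := by
  unfold determine_windows_py determine_windows_py_alt
  set M := max 1 MP with hMdef
  have hM : 1 ≤ M := le_max_left _ _
  simp only []
  by_cases hP0 : P ≤ 0
  · -- no paragraphs: everything is empty
    have h1 : PySem.List.pyRange 1 (min P M + 1) 1 = [] :=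
      PySem.List.pyRange_one_eq_nil (by omega)
    have h2 : ¬ P > M := by omega
    have h3 : PySem.List.pyRange 1 (P + 1) 1 = [] :=
      PySem.List.pyRange_one_eq_nil (by omega)
    have h4 : PySem.List.pyRange (max 1 (P - M + 1) + 1) (P + 1) 1 = [] :=
      PySem.List.pyRange_one_eq_nil (by omega)
    rw [h1, if_neg h2, h3, h4]
    rfl
  · replace hP0 : 0 < P := by omega
    by_cases hPM : P ≤ M
    · -- ramp-up only: windows = [[1..k] for k in 1..P], last = [1..P]
      have hmin : min P M = P := by omega
      rw [hmin]
      have h2 : ¬ P > M := by omega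
      rw [if_neg h2]
      rw [PySem.List.foldl_append_singleton_eq_map, List.nil_append]
      -- last element of the map
      have hsplit : PySem.List.pyRange 1 (P + 1) 1
          = PySem.List.pyRange 1 P 1 ++ [P] := by
        rw [PySem.List.pyRange_one_append 1 P (P + 1) (by omega) (by omega),
           PySem.List.pyRange_one_singleton]
      have hlast : ((PySem.List.pyRange 1 (P + 1) 1).map
            (fun k => PySem.List.pyRange 1 (k + 1) 1)).getLast?
          = some (PySem.List.pyRange 1 (P + 1) 1) := by
        rw [hsplit, List.map_append, List.getLast?_append]
        simp
        exact hsplit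
      rw [hlast]
      show (PySem.List.pyRange 1 (P + 1) 1).map (fun k => PySem.List.pyRange 1 (k + 1) 1)
            ++ rampDownA (PySem.List.pyRange 1 (P + 1) 1) = _
      -- forward part of B equals A's phase-1 map
      have hforward : (PySem.List.pyRange 1 (P + 1) 1).map
            (fun hi => PySem.List.pyRange (max 1 (hi - M + 1)) (hi + 1) 1)
          = (PySem.List.pyRange 1 (P + 1) 1).map
            (fun k => PySem.List.pyRange 1 (k + 1) 1) := by
        apply List.map_congr_left
        intro hi hmem
        rw [PySem.List.mem_pyRange_one] at hmem
        rw [max_one_of_le (by omega)]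
      rw [hforward]
      congr 1
      -- ramp-down: B's down range has max 1 (P-M+1) = 1
      rw [max_one_of_le (by omega)]
      exact rampDownA_pyRange P (P - 1).toNat 1 (by omega)
    · -- sliding phase present: M < P
      replace hPM : M < P := by omega
      have hmin : min P M = M := by omega
      rw [hmin]
      rw [if_pos (by omega : P > M)]
      rw [PySem.List.foldl_append_singleton_eq_map]
      rw [PySem.List.foldl_append_singleton_eq_map, List.nil_append]
      -- last element: phase-2 map is nonempty, last s = P - M + 1
      have hsplit2 : PySem.List.pyRange 2 (P - M + 2) 1
          = PySem.List.pyRange 2 (P - M + 1) 1 ++ [P - M + 1] := by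
        rw [PySem.List.pyRange_one_append 2 (P - M + 1) (P - M + 2) (by omega) (by omega),
           show P - M + 2 = P - M + 1 + 1 from by ring, PySem.List.pyRange_one_singleton]
      have hlast : ((PySem.List.pyRange 1 (M + 1) 1).map
              (fun k => PySem.List.pyRange 1 (k + 1) 1)
            ++ (PySem.List.pyRange 2 (P - M + 2) 1).map
              (fun s => PySem.List.pyRange s (s + M) 1)).getLast?
          = some (PySem.List.pyRange (P - M + 1) (P + 1) 1) := by
        rw [List.getLast?_append, hsplit2, List.map_append, List.getLast?_append]
        simp [show P - M + 1 + M = P + 1 by ring]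
      rw [hlast]
      show (PySem.List.pyRange 1 (M + 1) 1).map (fun k => PySem.List.pyRange 1 (k + 1) 1)
            ++ (PySem.List.pyRange 2 (P - M + 2) 1).map (fun s => PySem.List.pyRange s (s + M) 1)
            ++ rampDownA (PySem.List.pyRange (P - M + 1) (P + 1) 1) = _
      -- B's forward: split at M+1
      have hsplitB : PySem.List.pyRange 1 (P + 1) 1
          = PySem.List.pyRange 1 (M + 1) 1 ++ PySem.List.pyRange (M + 1) (P + 1) 1 :=
        PySem.List.pyRange_one_append 1 (M + 1) (P + 1) (by omega) (by omega)
      rw [hsplitB, List.map_append]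
      -- first half of the forward map = A's phase 1
      have hfwd1 : (PySem.List.pyRange 1 (M + 1) 1).map
            (fun hi => PySem.List.pyRange (max 1 (hi - M + 1)) (hi + 1) 1)
          = (PySem.List.pyRange 1 (M + 1) 1).map
            (fun k => PySem.List.pyRange 1 (k + 1) 1) := by
        apply List.map_congr_left
        intro hi hmem
        rw [PySem.List.mem_pyRange_one] at hmem
        rw [max_one_of_le (by omega)]
      rw [hfwd1]
      -- second half of the forward map = A's phase 2, by reindexing hi = s + (M - 1)
      have hreidx : PySem.List.pyRange (M + 1) (P + 1) 1
          = (PySem.List.pyRange 2 (P - M + 2) 1).map (fun x => x + (M - 1)) := by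
        have := pyRange_shift 2 (P - M + 2) (M - 1)
        simpa [show (2 : Int) + (M - 1) = M + 1 by ring,
               show P - M + 2 + (M - 1) = P + 1 by ring] using this
      have hfwd2 : (PySem.List.pyRange (M + 1) (P + 1) 1).map
            (fun hi => PySem.List.pyRange (max 1 (hi - M + 1)) (hi + 1) 1)
          = (PySem.List.pyRange 2 (P - M + 2) 1).map
            (fun s => PySem.List.pyRange s (s + M) 1) := by
        rw [hreidx, List.map_map]
        apply List.map_congr_left
        intro s hmem
        rw [PySem.List.mem_pyRange_one] at hmem
        simp only [Function.comp_apply]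
        rw [show max 1 (s + (M - 1) - M + 1) = s by omega,
            show s + (M - 1) + 1 = s + M by ring]
      rw [hfwd2]
      -- ramp-down parts agree
      rw [show max 1 (P - M + 1) = P - M + 1 by omega,
          rampDownA_pyRange P (M - 1).toNat (P - M + 1) (by omega),
          List.append_assoc]

-- ===== VERDICT (by name: the statement is the Claim_ definition above) =====
theorem determine_windows_py_spec : Claim_equal_determine_windows_py := by
  intro P MP _
  unfold Spec_determine_windows_py
  exact determine_windows_py_eq P MP
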